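-- pv_equiv track=rewrite | github.com/pypi-data/pypi-mirror-397 | packages/prometh-cortex/prometh_cortex-0.3.0.tar.gz/prometh_cortex-0.3.0/src/prometh_cortex/parser/query_parser.py | _parse_tags_filter
-- ===== SOURCE A (Python) =====
-- from typing import Any, Dict, List, Optional, Tuple, Union
--
-- def _parse_tags_filter(value: str) -> List[str]:
--     """
--     Parse tags filter value with enhanced format support.
--
--     Supports:
--     - Single tag: "work"
--     - Multiple tags: "work,meetings" or "work|meetings" or "work+meetings"
--     - Negation: "!internal" or "-private"
--     - Mixed: "work,meetings,!internal"
--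
--     Args:
--         value: Tags filter value
--
--     Returns:
--         List of tag strings (with negation preserved)
--     """
--     # Support multiple separators: comma, pipe, plus
--     separators = [',', '|', '+']
--     tags = [value]
--
--     # Split by all supported separators
--     for sep in separators:
--         if any(sep in tag for tag in tags):
--             new_tags = []
--             for tag in tags:
--                 if sep in tag:
--                     new_tags.extend([t.strip() for t in tag.split(sep)])
--                 else:
--                     new_tags.append(tag)
--             tags = new_tags
--
--     # Clean up and normalize tags
--     cleaned_tags = []
--     for tag in tags:
--         tag = tag.strip()
--         if tag:
--             # Handle negation indicators
--             if tag.startswith('!') or tag.startswith('-'):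
--                 # Keep negation for potential future use
--                 cleaned_tags.append(tag)
--             else:
--                 cleaned_tags.append(tag)
--
--     return cleaned_tags
-- ===== SOURCE B (Python) =====
-- def _parse_tags_filter(value):
--     """Single pass: scan characters, cutting at any of the separators ',', '|', '+',
--     stripping each piece and keeping only non-empty pieces."""
--     tags = []
--     cur = []
--     for ch in value:
--         if ch in ',|+':
--             piece = ''.join(cur).strip()
--             if piece:
--                 tags.append(piece)
--             cur = []
--         else:
--             cur.append(ch)
--     piece = ''.join(cur).strip()
--     if piece:
--         tags.append(piece)
--     return tags
-- ===== Notes on version B (the rewrite author's own statement) =====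
-- stated objective: simpler
-- what changed: A makes three sequential passes, one per separator character, each rebuilding the whole tag list and re-splitting its pieces, plus a final cleanup pass; B makes a single character-level scan that cuts the string at any separator character and strips/filters each piece as it is flushed, also dropping A's dead negation branch.
import Mathlib
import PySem

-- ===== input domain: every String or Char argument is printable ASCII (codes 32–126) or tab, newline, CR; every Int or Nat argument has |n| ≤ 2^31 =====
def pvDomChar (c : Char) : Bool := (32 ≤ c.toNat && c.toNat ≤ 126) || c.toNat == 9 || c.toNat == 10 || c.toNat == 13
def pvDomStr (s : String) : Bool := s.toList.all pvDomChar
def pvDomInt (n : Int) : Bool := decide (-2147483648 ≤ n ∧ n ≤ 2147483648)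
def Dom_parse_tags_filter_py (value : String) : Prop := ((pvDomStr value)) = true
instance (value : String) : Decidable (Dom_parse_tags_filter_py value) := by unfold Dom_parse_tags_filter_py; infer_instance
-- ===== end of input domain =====

-- B replaces A's three sequential separator-splitting passes (each rebuilding the tag list)
-- by a single character-level pass that cuts at any of ',', '|', '+', stripping each piece
-- and keeping the non-empty ones (objective: simpler one-pass structure, same cost).


-- ===== PORT A =====
-- literal transliteration of A: three guarded separator loops rebuilding `tags`, then a cleanup loop
def parse_tags_filter_py (value : String) : List String :=
  let separators : List String := [",", "|", "+"]
  let tags : List String := [value]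
  let tags := separators.foldl (fun tags sep =>
    if tags.any (fun tag => PySem.Str.isIn sep tag) then
      tags.foldl (fun new_tags tag =>
        if PySem.Str.isIn sep tag then
          new_tags ++ (((PySem.Str.split? tag sep).getD []).map PySem.Str.strip)
        else
          new_tags ++ [tag]) []
    else tags) tags
  tags.foldl (fun cleaned_tags tag =>
    let tag := PySem.Str.strip tag
    if tag ≠ "" then
      if PySem.Str.startswith tag "!" || PySem.Str.startswith tag "-" then
        cleaned_tags ++ [tag]
      else
        cleaned_tags ++ [tag]
    else cleaned_tags) []

-- ===== PORT B =====
-- one pass over the characters: `cur` accumulates the current piece, flushed (stripped,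
-- kept if non-empty) at each separator and at the end of the string
def pvAltGo : List Char → List Char → List String → List String
  | [], cur, tags =>
      let piece := PySem.Chars.strip cur
      if piece ≠ [] then tags ++ [String.ofList piece] else tags
  | c :: rest, cur, tags =>
      if c == ',' || c == '|' || c == '+' then
        let piece := PySem.Chars.strip cur
        pvAltGo rest [] (if piece ≠ [] then tags ++ [String.ofList piece] else tags)
      else
        pvAltGo rest (cur ++ [c]) tags

def parse_tags_filter_py_alt (value : String) : List String :=
  pvAltGo value.toList [] []

-- ===== PRECONDITION & SPEC =====
def Spec_parse_tags_filter_py (value : String) (out : List String) : Prop := out = parse_tags_filter_py_alt value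
instance (value : String) (out : List String) : Decidable (Spec_parse_tags_filter_py value out) := by unfold Spec_parse_tags_filter_py; infer_instance

-- ===== CLAIM (what is proved, stated in full; the proofs are below) =====
def Claim_equal_parse_tags_filter_py : Prop := ∀ (value : String), Dom_parse_tags_filter_py value → Spec_parse_tags_filter_py value (parse_tags_filter_py value)

-- ===== LEMMAS AND PROOFS =====

def pvMapHead (f : List Char → List Char) : List (List Char) → List (List Char)
  | [] => []
  | h :: t => f h :: t

def pvMapLast (f : List Char → List Char) : List (List Char) → List (List Char)
  | [] => []
  | [x] => [f x]
  | x :: y :: t => x :: pvMapLast f (y :: t)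

def pvSAny (p : Char → Bool) : List Char → List (List Char)
  | [] => [[]]
  | a :: rest => if p a then [] :: pvSAny p rest else pvMapHead (a :: ·) (pvSAny p rest)

theorem pvSAny_ne_nil (p : Char → Bool) (cs : List Char) : pvSAny p cs ≠ [] := by
  induction cs with
  | nil => simp [pvSAny]
  | cons a rest ih =>
    simp only [pvSAny]
    split
    · simp
    · cases h : pvSAny p rest with
      | nil => exact absurd h ih
      | cons x t => simp [pvMapHead]

def pvClean (ps : List (List Char)) : List String :=
  ps.filterMap (fun x =>
    if PySem.Chars.strip x = [] then none else some (String.ofList (PySem.Chars.strip x)))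

theorem pvClean_cons (x : List Char) (t : List (List Char)) :
    pvClean (x :: t)
      = (if PySem.Chars.strip x = [] then [] else [String.ofList (PySem.Chars.strip x)]) ++ pvClean t := by
  simp only [pvClean, List.filterMap_cons]
  split <;> simp_all

theorem pvMapHead_mapHead (f g : List Char → List Char) (l : List (List Char)) :
    pvMapHead f (pvMapHead g l) = pvMapHead (fun x => f (g x)) l := by
  cases l <;> rfl

theorem pvMapHead_congr (f g : List Char → List Char) (h : ∀ x, f x = g x)
    (l : List (List Char)) : pvMapHead f l = pvMapHead g l := by
  cases l <;> simp [pvMapHead, h]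

theorem pvMapHead_id (l : List (List Char)) : pvMapHead (fun x => x) l = l := by
  cases l <;> rfl

theorem pvMapHead_append (f : List Char → List Char) (l t : List (List Char)) (h : l ≠ []) :
    pvMapHead f (l ++ t) = pvMapHead f l ++ t := by
  cases l with
  | nil => exact absurd rfl h
  | cons a l => rfl

theorem pvMapLast_cons_of_ne_nil (f : List Char → List Char) (x : List Char)
    (t : List (List Char)) (h : t ≠ []) : pvMapLast f (x :: t) = x :: pvMapLast f t := by
  cases t with
  | nil => exact absurd rfl h
  | cons y t => rfl

theorem pvMapLast_append_singleton (f : List Char → List Char) (l : List (List Char)) (x : List Char) :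
    pvMapLast f (l ++ [x]) = l ++ [f x] := by
  induction l with
  | nil => rfl
  | cons a l ih =>
    cases l with
    | nil => rfl
    | cons b l2 =>
      rw [List.cons_append, pvMapLast_cons_of_ne_nil _ _ _ (by simp), ih]
      simp

theorem pvMapLast_mapLast (f g : List Char → List Char) (l : List (List Char)) :
    pvMapLast f (pvMapLast g l) = pvMapLast (fun x => f (g x)) l := by
  induction l with
  | nil => rfl
  | cons a l ih =>
    cases l with
    | nil => rfl
    | cons b l2 =>
      rw [pvMapLast_cons_of_ne_nil g _ _ (by simp),
        pvMapLast_cons_of_ne_nil f _ _ (by cases l2 <;> simp [pvMapLast]),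
        pvMapLast_cons_of_ne_nil (fun x => f (g x)) _ _ (by simp), ih]

theorem pvMapLast_congr (f g : List Char → List Char) (h : ∀ x, f x = g x)
    (l : List (List Char)) : pvMapLast f l = pvMapLast g l := by
  induction l with
  | nil => rfl
  | cons a l ih =>
    cases l with
    | nil => simp [pvMapLast, h]
    | cons b l2 => rw [pvMapLast, pvMapLast, ih]

theorem pvSAny_flatMap (p q : Char → Bool) (cs : List Char) :
    (pvSAny p cs).flatMap (pvSAny q) = pvSAny (fun x => p x || q x) cs := by
  induction cs with
  | nil => simp [pvSAny]
  | cons a rest ih =>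
    by_cases hp : p a
    · simp [pvSAny, hp, ← ih]
    · obtain ⟨h, t, hs⟩ : ∃ h t, pvSAny p rest = h :: t := by
        cases e : pvSAny p rest with
        | nil => exact absurd e (pvSAny_ne_nil _ _)
        | cons x t => exact ⟨_, _, rfl⟩
      rw [hs] at ih
      obtain ⟨h2, t2, hs2⟩ : ∃ h2 t2, pvSAny q h = h2 :: t2 := by
        cases e : pvSAny q h with
        | nil => exact absurd e (pvSAny_ne_nil _ _)
        | cons x t => exact ⟨_, _, rfl⟩
      have ih' : pvSAny (fun x => p x || q x) rest = (h2 :: t2) ++ t.flatMap (pvSAny q) := by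
        rw [← ih]; simp [List.flatMap_cons, hs2]
      cases hq : q a with
      | true =>
        simp [pvSAny, hp, hq, hs, pvMapHead, List.flatMap_cons, ih', hs2]
      | false =>
        simp [pvSAny, hp, hq, hs, pvMapHead, List.flatMap_cons, ih', hs2]

theorem pvSAny_congr (p q : Char → Bool) (cs : List Char) (h : ∀ x ∈ cs, p x = q x) :
    pvSAny p cs = pvSAny q cs := by
  induction cs with
  | nil => rfl
  | cons a rest ih =>
    simp only [pvSAny, h a (by simp), ih (fun x hx => h x (by simp [hx]))]

theorem pvSAny_false (cs : List Char) : pvSAny (fun _ => false) cs = [cs] := by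
  induction cs with
  | nil => rfl
  | cons a rest ih => simp [pvSAny, ih, pvMapHead]

theorem pvSAny_append_singleton (q : Char → Bool) (xs : List Char) (a : Char) :
    pvSAny q (xs ++ [a])
      = if q a then pvSAny q xs ++ [[]] else pvMapLast (· ++ [a]) (pvSAny q xs) := by
  induction xs with
  | nil =>
    cases hq : q a <;> simp [pvSAny, hq, pvMapHead, pvMapLast]
  | cons x xs ih =>
    obtain ⟨h, t, hs⟩ : ∃ h t, pvSAny q xs = h :: t := by
      cases e : pvSAny q xs with
      | nil => exact absurd e (pvSAny_ne_nil _ _)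
      | cons y t => exact ⟨_, _, rfl⟩
    rw [hs] at ih
    cases hq : q a with
    | true =>
      simp only [hq, if_true] at ih ⊢
      by_cases hx : q x
      · simp [pvSAny, hx, ih, hs]
      · simp [pvSAny, hx, ih, hs, pvMapHead]
    | false =>
      simp only [hq, Bool.false_eq_true, if_false] at ih ⊢
      by_cases hx : q x
      · rw [List.cons_append]
        show (if q x = true then [] :: pvSAny q (xs ++ [a]) else pvMapHead (x :: ·) (pvSAny q (xs ++ [a])))
          = pvMapLast (fun x => x ++ [a]) (pvSAny q (x :: xs))
        rw [if_pos hx, ih]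
        show _ = pvMapLast (fun x => x ++ [a]) (if q x = true then [] :: pvSAny q xs else pvMapHead (x :: ·) (pvSAny q xs))
        rw [if_pos hx, hs, pvMapLast_cons_of_ne_nil (fun x => x ++ [a]) ([] : List Char) (h :: t) (by simp)]
      · simp only [List.cons_append, pvSAny, hx, Bool.false_eq_true, if_false, ih, hs, pvMapHead]
        cases t with
        | nil => simp [pvMapLast]
        | cons u t2 => rfl

theorem pvSplitOn_go_eq (c : Char) :
    ∀ (l : List Char) (fuel : Nat) (cur : List Char) (acc : List (List Char)),
      l.length < fuel →
      PySem.Chars.splitOn.go [c] fuel l cur acc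
        = acc.reverse ++ pvMapHead (fun x => cur.reverse ++ x) (pvSAny (· == c) l) := by
  intro l
  induction l with
  | nil =>
    intro fuel cur acc h
    cases fuel with
    | zero => omega
    | succ f =>
      simp [PySem.Chars.splitOn.go, pvSAny, pvMapHead]
  | cons a rest ih =>
    intro fuel cur acc h
    cases fuel with
    | zero => omega
    | succ f =>
      rw [PySem.Chars.splitOn.go]
      by_cases hca : c = a
      · subst hca
        have hpre : List.isPrefixOf [c] (c :: rest) = true := by simp [List.isPrefixOf]
        rw [if_pos hpre]
        simp only [List.length_cons, List.length_nil, List.drop_succ_cons, List.drop_zero,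
          Nat.zero_add] at h ⊢
        rw [ih f [] (cur.reverse :: acc) (by omega)]
        simp [pvSAny, pvMapHead, pvMapHead_append, List.reverse_cons]
        obtain ⟨h2, t2, hs2⟩ : ∃ h2 t2, pvSAny (· == c) rest = h2 :: t2 := by
          cases e : pvSAny (· == c) rest with
          | nil => exact absurd e (pvSAny_ne_nil _ _)
          | cons x t => exact ⟨_, _, rfl⟩
        simp [hs2, pvMapHead]
      · have hpre : List.isPrefixOf [c] (a :: rest) = false := by
          simp [List.isPrefixOf]; exact fun h' => absurd h' hca
        rw [if_neg (by simp [hpre])]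
        simp only [List.length_cons] at h
        rw [ih f (a :: cur) acc (by omega)]
        have hac : (a == c) = false := by simp; exact fun h' => absurd h'.symm hca
        simp only [pvSAny, hac, Bool.false_eq_true, if_false]
        obtain ⟨h2, t2, hs2⟩ : ∃ h2 t2, pvSAny (· == c) rest = h2 :: t2 := by
          cases e : pvSAny (· == c) rest with
          | nil => exact absurd e (pvSAny_ne_nil _ _)
          | cons x t => exact ⟨_, _, rfl⟩
        simp [hs2, pvMapHead]

theorem pvSplitOn_eq (c : Char) (s : List Char) :
    PySem.Chars.splitOn s [c] = pvSAny (· == c) s := by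
  rw [PySem.Chars.splitOn, pvSplitOn_go_eq c s (s.length + 1) [] [] (by omega)]
  obtain ⟨h2, t2, hs2⟩ : ∃ h2 t2, pvSAny (· == c) s = h2 :: t2 := by
    cases e : pvSAny (· == c) s with
    | nil => exact absurd e (pvSAny_ne_nil _ _)
    | cons x t => exact ⟨_, _, rfl⟩
  simp [hs2, pvMapHead]

theorem pvRstrip_append (l : List Char) (a : Char) :
    PySem.Chars.rstrip (l ++ [a])
      = if PySem.Chars.isspace a then PySem.Chars.rstrip l else l ++ [a] := by
  by_cases hw : PySem.Chars.isspace a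
  · simp [PySem.Chars.rstrip, hw, List.dropWhile_cons]
  · simp [PySem.Chars.rstrip, hw, List.dropWhile_cons]

theorem pvRstrip_cons (a : Char) (t : List Char) :
    PySem.Chars.rstrip (a :: t)
      = if PySem.Chars.rstrip t = [] then (if PySem.Chars.isspace a then [] else [a])
        else a :: PySem.Chars.rstrip t := by
  simp only [PySem.Chars.rstrip, List.reverse_cons, List.dropWhile_append]
  by_cases h : List.dropWhile PySem.Chars.isspace t.reverse = []
  · rw [h]
    by_cases hw : PySem.Chars.isspace a <;>
      simp [hw, PySem.Chars.rstrip, h, List.dropWhile_cons]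
  · rw [if_neg (by simpa using h)]
    simp [h, PySem.Chars.rstrip]

theorem pvRstrip_nil_iff (t : List Char) :
    PySem.Chars.rstrip t = [] ↔ PySem.Chars.lstrip t = [] := by
  simp [PySem.Chars.rstrip, PySem.Chars.lstrip, List.dropWhile_eq_nil_iff]

theorem pvLstrip_rstrip (x : List Char) :
    PySem.Chars.lstrip (PySem.Chars.rstrip x) = PySem.Chars.rstrip (PySem.Chars.lstrip x) := by
  induction x with
  | nil => rfl
  | cons a t ih =>
    by_cases hw : PySem.Chars.isspace a
    · rw [pvRstrip_cons]
      by_cases hn : PySem.Chars.rstrip t = []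
      · rw [if_pos hn, if_pos hw]
        have : PySem.Chars.lstrip (a :: t) = PySem.Chars.lstrip t := by
          simp [PySem.Chars.lstrip, List.dropWhile_cons, hw]
        rw [this]
        have h2 : PySem.Chars.lstrip t = [] := (pvRstrip_nil_iff t).mp hn
        rw [h2]
        rfl
      · rw [if_neg hn]
        have hl : PySem.Chars.lstrip (a :: PySem.Chars.rstrip t) = PySem.Chars.lstrip (PySem.Chars.rstrip t) := by
          simp [PySem.Chars.lstrip, List.dropWhile_cons, hw]
        rw [hl, ih]
        have : PySem.Chars.lstrip (a :: t) = PySem.Chars.lstrip t := by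
          simp [PySem.Chars.lstrip, List.dropWhile_cons, hw]
        rw [this]
    · have hl : PySem.Chars.lstrip (a :: t) = a :: t := by
        simp [PySem.Chars.lstrip, List.dropWhile_cons, hw]
      rw [hl, pvRstrip_cons]
      by_cases hn : PySem.Chars.rstrip t = []
      · rw [if_pos hn, if_neg hw]
        simp [PySem.Chars.lstrip, List.dropWhile_cons, hw, pvRstrip_cons, hn]
      · rw [if_neg hn]
        simp [PySem.Chars.lstrip, List.dropWhile_cons, hw, pvRstrip_cons, hn]

theorem pvRstrip_rstrip (x : List Char) :
    PySem.Chars.rstrip (PySem.Chars.rstrip x) = PySem.Chars.rstrip x := by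
  simp [PySem.Chars.rstrip, List.dropWhile_idempotent]

theorem pvLstrip_lstrip (x : List Char) :
    PySem.Chars.lstrip (PySem.Chars.lstrip x) = PySem.Chars.lstrip x := by
  simp [PySem.Chars.lstrip, List.dropWhile_idempotent]

theorem pvStrip_lstrip (x : List Char) :
    PySem.Chars.strip (PySem.Chars.lstrip x) = PySem.Chars.strip x := by
  simp [PySem.Chars.strip, pvLstrip_lstrip]

theorem pvStrip_rstrip (x : List Char) :
    PySem.Chars.strip (PySem.Chars.rstrip x) = PySem.Chars.strip x := by
  simp only [PySem.Chars.strip]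
  rw [pvLstrip_rstrip, pvRstrip_rstrip]

theorem pvSAny_lstrip (q : Char → Bool) (hq : ∀ x, PySem.Chars.isspace x = true → q x = false)
    (u : List Char) :
    pvSAny q (PySem.Chars.lstrip u) = pvMapHead PySem.Chars.lstrip (pvSAny q u) := by
  induction u with
  | nil => simp [PySem.Chars.lstrip, pvSAny, pvMapHead]
  | cons a t ih =>
    by_cases hw : PySem.Chars.isspace a
    · have hqa : q a = false := hq a hw
      have h1 : PySem.Chars.lstrip (a :: t) = PySem.Chars.lstrip t := by
        simp [PySem.Chars.lstrip, List.dropWhile_cons, hw]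
      rw [h1, ih]
      simp only [pvSAny, hqa, Bool.false_eq_true, if_false, pvMapHead_mapHead]
      obtain ⟨h2, t2, hs2⟩ : ∃ h2 t2, pvSAny q t = h2 :: t2 := by
        cases e : pvSAny q t with
        | nil => exact absurd e (pvSAny_ne_nil _ _)
        | cons x xt => exact ⟨_, _, rfl⟩
      rw [hs2]
      simp only [pvMapHead]
      congr 1
      simp [PySem.Chars.lstrip, List.dropWhile_cons, hw]
    · have h1 : PySem.Chars.lstrip (a :: t) = a :: t := by
        simp [PySem.Chars.lstrip, List.dropWhile_cons, hw]
      rw [h1]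
      cases hqa : q a with
      | true =>
        simp [pvSAny, hqa, pvMapHead, PySem.Chars.lstrip]
      | false =>
        simp only [pvSAny, hqa, Bool.false_eq_true, if_false, pvMapHead_mapHead]
        obtain ⟨h2, t2, hs2⟩ : ∃ h2 t2, pvSAny q t = h2 :: t2 := by
          cases e : pvSAny q t with
          | nil => exact absurd e (pvSAny_ne_nil _ _)
          | cons x xt => exact ⟨_, _, rfl⟩
        rw [hs2]
        simp only [pvMapHead]
        congr 1
        simp [PySem.Chars.lstrip, List.dropWhile_cons, hw]

theorem pvSAny_rstrip (q : Char → Bool) (hq : ∀ x, PySem.Chars.isspace x = true → q x = false)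
    (u : List Char) :
    pvSAny q (PySem.Chars.rstrip u) = pvMapLast PySem.Chars.rstrip (pvSAny q u) := by
  induction u using List.reverseRecOn with
  | nil => simp [PySem.Chars.rstrip, pvSAny, pvMapLast]
  | append_singleton xs a ih =>
    rw [pvRstrip_append]
    by_cases hw : PySem.Chars.isspace a
    · have hqa : q a = false := hq a hw
      rw [if_pos hw, ih, pvSAny_append_singleton, hqa]
      simp only [Bool.false_eq_true, if_false, pvMapLast_mapLast]
      refine pvMapLast_congr _ _ (fun x => ?_) _
      rw [pvRstrip_append, if_pos hw]
    · rw [if_neg hw, pvSAny_append_singleton]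
      cases hqa : q a with
      | true =>
        simp only [hqa, if_true]
        rw [pvMapLast_append_singleton]
        rfl
      | false =>
        simp only [hqa, Bool.false_eq_true, if_false, pvMapLast_mapLast]
        refine pvMapLast_congr _ _ (fun x => ?_) _
        rw [pvRstrip_append, if_neg hw]

theorem pvClean_mapHead_lstrip (ps : List (List Char)) :
    pvClean (pvMapHead PySem.Chars.lstrip ps) = pvClean ps := by
  cases ps with
  | nil => rfl
  | cons h t =>
    simp only [pvMapHead, pvClean_cons, pvStrip_lstrip]

theorem pvClean_mapLast_rstrip (ps : List (List Char)) :
    pvClean (pvMapLast PySem.Chars.rstrip ps) = pvClean ps := by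
  induction ps with
  | nil => rfl
  | cons h t ih =>
    cases t with
    | nil => simp only [pvMapLast, pvClean_cons, pvStrip_rstrip]
    | cons y t2 =>
      rw [pvMapLast_cons_of_ne_nil _ _ _ (by simp), pvClean_cons, pvClean_cons, ih]

theorem pvClean_sAny_strip (q : Char → Bool) (hq : ∀ x, PySem.Chars.isspace x = true → q x = false)
    (u : List Char) :
    pvClean (pvSAny q (PySem.Chars.strip u)) = pvClean (pvSAny q u) := by
  show pvClean (pvSAny q (PySem.Chars.rstrip (PySem.Chars.lstrip u))) = pvClean (pvSAny q u)
  rw [pvSAny_rstrip q hq, pvClean_mapLast_rstrip, pvSAny_lstrip q hq, pvClean_mapHead_lstrip]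

theorem pvClean_flatMap_congr {α : Type} (F G : α → List (List Char)) (ps : List α)
    (h : ∀ t ∈ ps, pvClean (F t) = pvClean (G t)) :
    pvClean (ps.flatMap F) = pvClean (ps.flatMap G) := by
  induction ps with
  | nil => rfl
  | cons x ps ih =>
    simp only [List.flatMap_cons, pvClean, List.filterMap_append] at *
    rw [h x (by simp), ih (fun t ht => h t (by simp [ht]))]

def pvVal (q : Char → Bool) (tags : List String) : List String :=
  pvClean ((tags.map String.toList).flatMap (pvSAny q))

def pvStepA (tags : List String) (sep : String) : List String :=
  if tags.any (fun tag => PySem.Str.isIn sep tag) then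
    tags.foldl (fun new_tags tag =>
      if PySem.Str.isIn sep tag then
        new_tags ++ (((PySem.Str.split? tag sep).getD []).map PySem.Str.strip)
      else
        new_tags ++ [tag]) []
  else tags

theorem pvNotIn_of_isIn_false (sep : String) (c : Char) (hsep : sep.toList = [c])
    (tag : String) (h : PySem.Str.isIn sep tag = false) : c ∉ tag.toList := by
  have h2 : PySem.Chars.isIn sep.toList tag.toList = false := h
  rw [hsep] at h2
  rw [← List.singleton_infix_iff]
  exact (PySem.Chars.isIn_eq_false_iff _ _).mp h2

theorem pvStepA_val (sep : String) (c : Char) (hsep : sep.toList = [c])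
    (q : Char → Bool) (hq : ∀ x, PySem.Chars.isspace x = true → q x = false)
    (tags : List String) :
    pvVal q (pvStepA tags sep) = pvVal (fun x => x == c || q x) tags := by
  unfold pvStepA
  by_cases hg : tags.any (fun tag => PySem.Str.isIn sep tag)
  · rw [if_pos hg]
    have hbody : (fun (new_tags : List String) tag =>
        if PySem.Str.isIn sep tag = true then
          new_tags ++ (((PySem.Str.split? tag sep).getD []).map PySem.Str.strip)
        else new_tags ++ [tag])
      = (fun (new_tags : List String) tag => new_tags ++
          (if PySem.Str.isIn sep tag = true then
            (((PySem.Str.split? tag sep).getD []).map PySem.Str.strip) else [tag])) := by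
      funext acc tag
      exact (apply_ite (fun l => acc ++ l) _ _ _).symm
    rw [hbody, PySem.List.foldl_append_eq_flatMap, List.nil_append]
    unfold pvVal
    rw [List.map_flatMap, List.flatMap_assoc, List.flatMap_map]
    apply pvClean_flatMap_congr
    intro tag _
    by_cases hin : PySem.Str.isIn sep tag = true
    · have hsplit : (((PySem.Str.split? tag sep).getD []).map PySem.Str.strip).map String.toList
          = (pvSAny (· == c) tag.toList).map PySem.Chars.strip := by
        simp only [PySem.Str.split?, hsep, PySem.Chars.split?, List.isEmpty_cons,
          Bool.false_eq_true, if_false, Option.map_some, Option.getD_some, pvSplitOn_eq,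
          List.map_map]
        apply List.map_congr_left
        intro u _
        show (PySem.Str.strip (String.ofList u)).toList = PySem.Chars.strip u
        simp [PySem.Str.strip]
      rw [if_pos hin, hsplit]
      rw [← pvSAny_flatMap (· == c) q tag.toList, List.flatMap_map]
      exact pvClean_flatMap_congr _ _ _ (fun u _ => pvClean_sAny_strip q hq u)
    · rw [if_neg hin]
      have hc : c ∉ tag.toList :=
        pvNotIn_of_isIn_false sep c hsep tag (by simpa using hin)
      simp only [List.map_cons, List.map_nil, List.flatMap_cons, List.flatMap_nil,
        List.append_nil]
      rw [pvSAny_congr q (fun x => x == c || q x) tag.toList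
        (fun x hx => by
          have : (x == c) = false := by
            cases h : x == c
            · rfl
            · exact absurd ((beq_iff_eq).mp h ▸ hx) hc
          simp [this])]
  · rw [if_neg hg]
    unfold pvVal
    rw [List.flatMap_map, List.flatMap_map]
    apply pvClean_flatMap_congr
    intro tag htag
    have hfalse : PySem.Str.isIn sep tag = false := by
      have hg' : tags.any (fun tag => PySem.Str.isIn sep tag) = false := by simpa using hg
      simpa using List.any_eq_false.mp hg' tag htag
    have hc : c ∉ tag.toList := pvNotIn_of_isIn_false sep c hsep tag hfalse
    rw [pvSAny_congr q (fun x => x == c || q x) tag.toList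
      (fun x hx => by
        have : (x == c) = false := by
          cases h : x == c
          · rfl
          · exact absurd ((beq_iff_eq).mp h ▸ hx) hc
        simp [this])]

theorem pvCleanup_eq (tags : List String) (acc : List String) :
    tags.foldl (fun cleaned_tags tag =>
      let tag := PySem.Str.strip tag
      if tag ≠ "" then
        if PySem.Str.startswith tag "!" || PySem.Str.startswith tag "-" then
          cleaned_tags ++ [tag]
        else
          cleaned_tags ++ [tag]
      else cleaned_tags) acc
    = acc ++ pvClean (tags.map String.toList) := by
  induction tags generalizing acc with
  | nil => simp [pvClean]
  | cons tag tags ih =>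
    rw [List.foldl_cons, ih, List.map_cons, pvClean_cons]
    have hstrip : PySem.Str.strip tag = String.ofList (PySem.Chars.strip tag.toList) := rfl
    by_cases h : PySem.Chars.strip tag.toList = []
    · have hnn : ¬ (PySem.Str.strip tag ≠ "") := by
        simp [hstrip, h, String.ofList_eq_empty_iff]
      simp [hnn, h]
    · have hne : PySem.Str.strip tag ≠ "" := by
        simp [hstrip, String.ofList_eq_empty_iff, h]
      simp [hne, h, hstrip, ite_self, List.append_assoc]

theorem pvAltGo_eq (cs : List Char) : ∀ (cur : List Char) (tags : List String),
    pvAltGo cs cur tags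
      = tags ++ pvClean (pvMapHead (fun x => cur ++ x)
          (pvSAny (fun c => c == ',' || c == '|' || c == '+') cs)) := by
  induction cs with
  | nil =>
    intro cur tags
    show (if PySem.Chars.strip cur ≠ [] then tags ++ [String.ofList (PySem.Chars.strip cur)] else tags)
      = tags ++ pvClean (pvMapHead (fun x => cur ++ x) [[]])
    simp only [pvMapHead, List.append_nil, pvClean_cons, pvClean]
    by_cases h : PySem.Chars.strip cur = [] <;> simp [h]
  | cons c rest ih =>
    intro cur tags
    by_cases hsepc : (c == ',' || c == '|' || c == '+') = true
    · show pvAltGo (c :: rest) cur tags = _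
      rw [pvAltGo, if_pos hsepc, ih, pvMapHead_congr _ _ (fun x => List.nil_append x),
        pvMapHead_id]
      simp only [pvSAny, hsepc, if_true, pvMapHead, pvClean_cons, List.append_nil]
      by_cases h : PySem.Chars.strip cur = [] <;> simp [h]
    · show pvAltGo (c :: rest) cur tags = _
      rw [pvAltGo, if_neg hsepc, ih]
      simp only [pvSAny, hsepc, Bool.false_eq_true, if_false, pvMapHead_mapHead]
      congr 2
      apply pvMapHead_congr
      intro x
      simp

theorem pvSepNotWs2 (x : Char) (hx : PySem.Chars.isspace x = true) : (x == '|') = false := by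
  cases h : x == '|'
  · rfl
  · exact absurd ((beq_iff_eq).mp h ▸ hx) (by decide)

theorem pvSepNotWs3 (x : Char) (hx : PySem.Chars.isspace x = true) : (x == '+') = false := by
  cases h : x == '+'
  · rfl
  · exact absurd ((beq_iff_eq).mp h ▸ hx) (by decide)

theorem parse_tags_filter_py_main (value : String) :
    parse_tags_filter_py value = parse_tags_filter_py_alt value := by
  have hA : parse_tags_filter_py value
      = (pvStepA (pvStepA (pvStepA [value] ",") "|") "+").foldl (fun cleaned_tags tag =>
          let tag := PySem.Str.strip tag
          if tag ≠ "" then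
            if PySem.Str.startswith tag "!" || PySem.Str.startswith tag "-" then
              cleaned_tags ++ [tag]
            else
              cleaned_tags ++ [tag]
          else cleaned_tags) [] := rfl
  rw [hA, pvCleanup_eq, List.nil_append]
  have hval0 : ∀ ts : List String, pvClean (ts.map String.toList) = pvVal (fun _ => false) ts := by
    intro ts
    unfold pvVal
    congr 1
    rw [List.flatMap_map]
    have h1 : ∀ t : List Char, pvSAny (fun _ => false) t = [t] := pvSAny_false
    simp only [h1]
    induction ts with
    | nil => rfl
    | cons a ts ih => simp [List.flatMap_cons, ih]
  rw [hval0]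
  rw [pvStepA_val "+" '+' rfl _ (fun x _ => rfl)]
  rw [pvStepA_val "|" '|' rfl _ (fun x hx => by simp [pvSepNotWs3 x hx])]
  rw [pvStepA_val "," ',' rfl _ (fun x hx => by simp [pvSepNotWs2 x hx, pvSepNotWs3 x hx])]
  show pvVal _ [value] = _
  unfold pvVal
  rw [parse_tags_filter_py_alt, pvAltGo_eq, List.nil_append]
  simp only [List.map_cons, List.map_nil, List.flatMap_cons, List.flatMap_nil, List.append_nil]
  rw [pvMapHead_congr _ _ (fun x => List.nil_append x), pvMapHead_id]
  congr 1
  apply pvSAny_congr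
  intro x _
  simp [Bool.or_assoc]

-- ===== VERDICT (by name: the statement is the Claim_ definition above) =====
theorem parse_tags_filter_py_spec : Claim_equal_parse_tags_filter_py := by
  intro value _
  unfold Spec_parse_tags_filter_py
  exact parse_tags_filter_py_main value
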